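-- pv_equiv track=rewrite | github.com/FelixZhang028/waste_incineration | src/mtsc_train/ml/trainer.py | _label_names_by_id
-- ===== SOURCE A (Python) =====
-- def _label_names_by_id(label_map: dict[str, int]) -> list[str]:
--     pairs = sorted(((idx, name) for name, idx in label_map.items()), key=lambda x: x[0])
--     if not pairs:
--         raise ValueError("label_map cannot be empty")
--     ids = [idx for idx, _ in pairs]
--     if ids != list(range(len(pairs))):
--         raise ValueError(f"label ids must be contiguous from 0, got {ids}")
--     return [name for _, name in pairs]
-- ===== SOURCE B (Python) =====
-- def _label_names_by_id(label_map: dict[str, int]) -> list[str]: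
--     n = len(label_map)
--     if n == 0:
--         raise ValueError("label_map cannot be empty")
--     result = [None] * n
--     for name, idx in label_map.items():
--         if 0 <= idx < n and result[idx] is None:
--             result[idx] = name
--         else:
--             raise ValueError(
--                 f"label ids must be contiguous from 0, got {sorted(label_map.values())}"
--             )
--     return result
-- ===== Notes on version B (the rewrite author's own statement) =====
-- stated objective: faster
-- what changed: Replaced the comparison sort over (id, name) pairs and the ids-vs-range list comparison by a single O(n) pass that places each name directly into a preallocated slot result[idx], detecting out-of-range and duplicate ids on the fly.
import Mathlib
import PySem

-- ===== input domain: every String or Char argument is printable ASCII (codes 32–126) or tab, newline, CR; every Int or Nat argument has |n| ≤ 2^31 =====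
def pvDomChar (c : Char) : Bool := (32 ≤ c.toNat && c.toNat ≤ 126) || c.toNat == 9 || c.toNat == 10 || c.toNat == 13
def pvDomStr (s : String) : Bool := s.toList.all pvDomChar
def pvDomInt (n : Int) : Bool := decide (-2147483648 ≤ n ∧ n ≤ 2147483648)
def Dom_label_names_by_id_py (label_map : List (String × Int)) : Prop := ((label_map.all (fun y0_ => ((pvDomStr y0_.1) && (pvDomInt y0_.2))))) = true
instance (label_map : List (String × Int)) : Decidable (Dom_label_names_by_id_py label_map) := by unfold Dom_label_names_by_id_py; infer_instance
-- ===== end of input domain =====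

-- B replaces A's comparison sort of (id, name) pairs by a single O(n) placement pass into a
-- preallocated slot list (objective: faster). On inputs outside Pre_ Python A raises ValueError
-- (and B raises the same error); the ports return [] there.

-- ===== PORT A =====
def label_names_by_id_py (label_map : List (String × Int)) : List String :=
  let pairs := PySem.List.sorted (label_map.map (fun p => (p.2, p.1))) (fun x => x.1)
  if pairs = [] then []  -- Python: raise ValueError("label_map cannot be empty")
  else
    let ids := pairs.map (fun p => p.1)
    if ids ≠ (List.range pairs.length).map (fun i : Nat => (i : Int)) then []
      -- Python: raise ValueError(f"label ids must be contiguous from 0, got {ids}")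
    else pairs.map (fun p => p.2)

-- ===== PORT B =====
-- one loop iteration of B: place the name at slot idx, or fail (none = ValueError raised)
def pvPlaceStep (n : Nat) (acc : Option (List (Option String))) (p : String × Int) :
    Option (List (Option String)) :=
  match acc with
  | none => none
  | some r =>
    if 0 ≤ p.2 ∧ p.2 < (n : Int) ∧ r.getD p.2.toNat none = none then
      some (r.set p.2.toNat (some p.1))
    else none

def label_names_by_id_py_alt (label_map : List (String × Int)) : List String :=
  let n := label_map.length
  if n = 0 then []  -- Python: raise ValueError("label_map cannot be empty")
  else
    match label_map.foldl (pvPlaceStep n) (some (List.replicate n none)) with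
    | none => []  -- Python: raise ValueError(f"label ids must be contiguous from 0, got {...}")
    | some r => r.map (fun o => o.getD "")  -- every slot is filled here; Python returns result

-- ===== PRECONDITION & SPEC =====
-- Pre_ = exactly the inputs where Python A returns: nonempty, and the ids cover 0..n-1
-- (together with the length this forces the ids to be exactly 0..n-1 without repetition).
def Pre_label_names_by_id_py (label_map : List (String × Int)) : Prop :=
  label_map ≠ [] ∧
  ∀ k ∈ PySem.List.pyRange 0 (label_map.length : Int) 1, k ∈ label_map.map (fun p => p.2)
instance (label_map : List (String × Int)) : Decidable (Pre_label_names_by_id_py label_map) := by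
  unfold Pre_label_names_by_id_py; infer_instance

def pvWitness_label_names_by_id_py : (List (String × Int)) := [("d", 3), ("b", 0), ("f", 5), ("a", 1), ("c", 2), ("e", 4)]

def Spec_label_names_by_id_py (label_map : List (String × Int)) (out : List String) : Prop := out = label_names_by_id_py_alt label_map
instance (label_map : List (String × Int)) (out : List String) : Decidable (Spec_label_names_by_id_py label_map out) := by unfold Spec_label_names_by_id_py; infer_instance

-- ===== CLAIM (what is proved, stated in full; the proofs are below) =====
def Claim_equal_label_names_by_id_py : Prop := ∀ (label_map : List (String × Int)), Dom_label_names_by_id_py label_map → Pre_label_names_by_id_py label_map → Spec_label_names_by_id_py label_map (label_names_by_id_py label_map)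

-- ===== LEMMAS AND PROOFS =====

-- the name paired with id k in label_map (first match; unique under Pre_)
def pvNameAt (label_map : List (String × Int)) (k : Int) : Option String :=
  (label_map.find? (fun p => p.2 == k)).map (fun p => p.1)

theorem pv_castrange_nodup (n : Nat) : ((List.range n).map (fun i : Nat => (i : Int))).Nodup :=
  List.Nodup.map (fun a b h => by exact_mod_cast h) List.nodup_range

-- a list of pairs with nodup first components is the map over its own firsts picking by find?
theorem pv_eq_map_fst_find (xs : List (Int × String)) (h : (xs.map Prod.fst).Nodup) :
    xs = (xs.map Prod.fst).map
      (fun k => (k, (((xs.find? (fun p => p.1 == k)).map Prod.snd).getD ""))) := by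
  induction xs with
  | nil => rfl
  | cons a t ih =>
    simp only [List.map_cons, List.nodup_cons] at h ⊢
    rw [List.cons_eq_cons]
    constructor
    · simp [List.find?_cons_of_pos]
    · have ht := ih h.2
      conv_lhs => rw [ht]
      apply List.map_congr_left
      intro k hk
      have hne : ¬ (a.1 == k) = true := by
        simp only [beq_iff_eq]
        intro hEq; exact h.1 (hEq ▸ hk)
      rw [show List.find? (fun p => p.1 == k) (a :: t) = List.find? (fun p => p.1 == k) t from
        List.find?_cons_of_neg hne]

-- under Pre_, the ids are a permutation of [0, …, n-1]
theorem pv_ids_perm (lm : List (String × Int)) (hpre : Pre_label_names_by_id_py lm) :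
    ((List.range lm.length).map (fun i : Nat => (i : Int))).Perm (lm.map (fun p => p.2)) := by
  obtain ⟨-, hcov⟩ := hpre
  have hsub : ((List.range lm.length).map (fun i : Nat => (i : Int))) ⊆ lm.map (fun p => p.2) := by
    intro x hx
    simp only [List.mem_map] at hx
    obtain ⟨i, hi, rfl⟩ := hx
    exact hcov (i : Int) (by
      rw [PySem.List.mem_pyRange_one]
      exact ⟨by exact_mod_cast Nat.zero_le i, by exact_mod_cast List.mem_range.mp hi⟩)
  exact ((pv_castrange_nodup lm.length).subperm hsub).perm_of_length_le (by simp)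

-- A's value under Pre_: the names listed by id
theorem pvA_eq (lm : List (String × Int)) (hpre : Pre_label_names_by_id_py lm) :
    label_names_by_id_py lm =
      (List.range lm.length).map (fun i : Nat => ((pvNameAt lm (i : Int)).getD "")) := by
  have hperm := pv_ids_perm lm hpre
  set n := lm.length with hn
  set xs := lm.map (fun p => (p.2, p.1)) with hxs
  have hfst : xs.map Prod.fst = lm.map (fun p => p.2) := by
    simp [hxs, List.map_map, Function.comp_def]
  have hndids : (lm.map (fun p => p.2)).Nodup := hperm.nodup (pv_castrange_nodup n)
  set g : Int → Int × String :=
    fun k => (k, (((xs.find? (fun p => p.1 == k)).map Prod.snd).getD "")) with hg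
  set ys := ((List.range n).map (fun i : Nat => (i : Int))).map g with hys
  have hsorted : PySem.List.sorted xs (fun x => x.1) = ys := by
    apply PySem.List.sorted_eq_of_perm_of_pairwise_lt
    · have hx : xs = (xs.map Prod.fst).map g := pv_eq_map_fst_find xs (hfst ▸ hndids)
      conv_rhs => rw [hx, hfst]
      exact hperm.map _
    · rw [List.pairwise_map, List.pairwise_map]
      refine List.Pairwise.imp ?_ List.pairwise_lt_range
      intro a b h
      simp only [hg]
      exact_mod_cast h
  have hn0 : 0 < n := by
    cases lm with
    | nil => exact absurd rfl hpre.1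
    | cons a t => simp [hn]
  have hyslen : ys.length = n := by simp [hys]
  have hysids : ys.map (fun p => p.1) = (List.range n).map (fun i : Nat => (i : Int)) := by
    simp [hys, hg, List.map_map, Function.comp_def]
  unfold label_names_by_id_py
  rw [← hxs, hsorted]
  have hnonnil : ys ≠ [] := by
    intro h
    have := congrArg List.length h
    rw [hyslen] at this
    simp at this
    omega
  rw [if_neg hnonnil]
  have hcontig : ys.map (fun p => p.1) = (List.range ys.length).map (fun i : Nat => (i : Int)) := by
    rw [hyslen]; exact hysids
  rw [if_neg (not_ne_iff.mpr hcontig)]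
  simp only [hys, hg, List.map_map, Function.comp_def]
  apply List.map_congr_left
  intro i hi
  simp [pvNameAt, hxs, List.find?_map, Function.comp_def]

-- B's loop invariant: after processing `done`, slot j holds the name find? finds in `done`
theorem pvB_fold (lm : List (String × Int)) (hpre : Pre_label_names_by_id_py lm)
    (hnd : (lm.map (fun p => p.2)).Nodup) :
    ∀ (rest done : List (String × Int)) (r : List (Option String)),
      done ++ rest = lm →
      r.length = lm.length →
      (∀ j : Nat, j < lm.length → r[j]? = some (pvNameAt done (j : Int))) →
      ∃ r', rest.foldl (pvPlaceStep lm.length) (some r) = some r' ∧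
        r'.length = lm.length ∧
        (∀ j : Nat, j < lm.length → r'[j]? = some (pvNameAt lm (j : Int))) := by
  intro rest
  induction rest with
  | nil =>
    intro done r hsplit hlen hinv
    rw [List.append_nil] at hsplit
    subst hsplit
    exact ⟨r, rfl, hlen, hinv⟩
  | cons p t ih =>
    intro done r hsplit hlen hinv
    -- p.2 is some i < n
    have hmem : p.2 ∈ lm.map (fun q => q.2) := by
      rw [← hsplit]; simp
    have hrng : p.2 ∈ (List.range lm.length).map (fun i : Nat => (i : Int)) :=
      (pv_ids_perm lm hpre).mem_iff.mpr hmem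
    simp only [List.mem_map] at hrng
    obtain ⟨i, hi, hpi⟩ := hrng
    have hilt : i < lm.length := List.mem_range.mp hi
    -- p.2 does not occur among done's ids
    have hnotdone : ∀ q ∈ done, ¬ (q.2 == p.2) = true := by
      intro q hq hbe
      simp only [beq_iff_eq] at hbe
      have hnodup : (done.map (fun x => x.2) ++ p.2 :: t.map (fun x => x.2)).Nodup := by
        rw [show done.map (fun x => x.2) ++ p.2 :: t.map (fun x => x.2)
              = (done ++ p :: t).map (fun x => x.2) by simp, hsplit]
        exact hnd
      have hdis := List.disjoint_of_nodup_append hnodup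
      exact hdis (List.mem_map_of_mem hq) (by simp [hbe])
    have hfind_done : done.find? (fun q => q.2 == p.2) = none :=
      List.find?_eq_none.mpr hnotdone
    have hslot : r[i]? = some none := by
      have h := hinv i hilt
      simp only [pvNameAt] at h
      rw [hpi, hfind_done] at h
      simpa using h
    have hslotD : r.getD p.2.toNat none = none := by
      rw [List.getD_eq_getElem?_getD, ← hpi]
      simp only [Int.toNat_natCast]
      rw [hslot]; rfl
    have hstep : pvPlaceStep lm.length (some r) p = some (r.set p.2.toNat (some p.1)) := by
      simp only [pvPlaceStep]
      rw [if_pos ⟨by rw [← hpi]; exact_mod_cast Nat.zero_le i,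
        by rw [← hpi]; exact_mod_cast hilt, hslotD⟩]
    rw [List.foldl_cons, hstep]
    apply ih (done ++ [p]) (r.set p.2.toNat (some p.1))
    · simpa using hsplit
    · simpa using hlen
    · intro j hj
      rw [List.getElem?_set]
      by_cases hji : p.2.toNat = j
      · have hij : (j : Int) = p.2 := by omega
        rw [if_pos hji, if_pos (by omega)]
        simp only [pvNameAt]
        rw [hij, List.find?_append, hfind_done]
        simp [List.find?_cons_of_pos]
      · have hne2 : p.2 ≠ (j : Int) := fun h => hji (by omega)
        rw [if_neg hji, hinv j hj]
        simp only [pvNameAt]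
        rw [List.find?_append]
        simp [hne2]

-- B's value under Pre_
theorem pvB_eq (lm : List (String × Int)) (hpre : Pre_label_names_by_id_py lm) :
    label_names_by_id_py_alt lm =
      (List.range lm.length).map (fun i : Nat => ((pvNameAt lm (i : Int)).getD "")) := by
  have hnd : (lm.map (fun p => p.2)).Nodup :=
    (pv_ids_perm lm hpre).nodup (pv_castrange_nodup lm.length)
  have hn0 : lm.length ≠ 0 := by
    intro h; exact hpre.1 (List.length_eq_zero_iff.mp h)
  obtain ⟨r', hfold, hlen, hinv⟩ :=
    pvB_fold lm hpre hnd lm [] (List.replicate lm.length none) rfl (by simp)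
      (by intro j hj; simp [hj, pvNameAt])
  unfold label_names_by_id_py_alt
  simp only [if_neg hn0, hfold]
  apply List.ext_getElem (by simp [hlen])
  intro j h1 h2
  have hj : j < lm.length := by simpa using h2
  have h := hinv j hj
  have hjr : j < r'.length := by omega
  rw [List.getElem?_eq_getElem hjr] at h
  have hr : r'[j] = pvNameAt lm (j : Int) := Option.some.inj h
  simp [hr]

-- ===== VERDICT (by name: the statement is the Claim_ definition above) =====
theorem label_names_by_id_py_spec : Claim_equal_label_names_by_id_py := by
  intro lm _ hpre
  unfold Spec_label_names_by_id_py
  rw [pvA_eq lm hpre, pvB_eq lm hpre]
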